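-- pv_equiv track=rewrite | github.com/Tanuja2525/coding-challenges-bootcamp | pattern_and_nested_loops/challenge40/factorial.py | factorial_pattern
-- ===== SOURCE A (Python) =====
-- def factorial_pattern(n):
--     fact = 1
--     num = 1
--     result = []
--
--     for i in range(1, n + 1):
--         row = []
--         for _ in range(i):
--             fact *= num
--             row.append(str(fact))
--             num += 1
--         result.append(" ".join(row))
--     return result
-- ===== SOURCE B (Python) =====
-- def factorial_pattern(n):
--     # flat list of all factorials 1!..T!  (T = n(n+1)/2), then slice into rows of 1,2,...,n
--     total = n * (n + 1) // 2 if n > 0 else 0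
--     flat = []
--     p = 1
--     for k in range(1, total + 1):
--         p *= k
--         flat.append(str(p))
--     result = []
--     off = 0
--     for i in range(1, n + 1):
--         result.append(" ".join(flat[off:off + i]))
--         off += i
--     return result
-- ===== Notes on version B (the rewrite author's own statement) =====
-- stated objective: alternative
-- what changed: Replaces A's nested loops carrying fact/num across rows by a two-pass scheme: one flat pass producing all n(n+1)/2 factorial strings, then a slicing pass cutting consecutive chunks of sizes 1..n and joining each.
import Mathlib
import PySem

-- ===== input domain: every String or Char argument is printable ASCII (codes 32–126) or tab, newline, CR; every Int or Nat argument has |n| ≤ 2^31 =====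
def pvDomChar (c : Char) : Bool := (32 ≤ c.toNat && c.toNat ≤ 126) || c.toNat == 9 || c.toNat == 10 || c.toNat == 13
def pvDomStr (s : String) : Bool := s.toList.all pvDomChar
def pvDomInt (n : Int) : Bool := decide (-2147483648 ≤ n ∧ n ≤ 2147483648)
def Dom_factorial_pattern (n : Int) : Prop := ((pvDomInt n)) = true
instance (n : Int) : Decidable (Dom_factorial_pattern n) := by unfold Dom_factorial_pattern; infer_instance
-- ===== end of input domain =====

-- B replaces A's nested loops carrying fact/num across rows by a two-pass scheme
-- (one flat factorial list, then slicing into rows of sizes 1..n); alternative decomposition, same cost.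


-- ===== PORT A =====
def factorial_pattern (n : Int) : List String :=
  ((PySem.List.pyRange 1 (n + 1) 1).foldl
    (fun (st : Int × Int × List String) i =>
      let t := (PySem.List.pyRange 0 i 1).foldl
        (fun (u : Int × Int × List String) _ =>
          (u.1 * u.2.1, u.2.1 + 1, u.2.2 ++ [PySem.Int.toStr (u.1 * u.2.1)]))
        (st.1, st.2.1, ([] : List String))
      (t.1, t.2.1, st.2.2 ++ [PySem.Str.join " " t.2.2]))
    (1, 1, [])).2.2

-- ===== PORT B =====
def factorial_pattern_alt (n : Int) : List String :=
  let total : Int := if n > 0 then PySem.Int.floordiv (n * (n + 1)) 2 else 0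
  let flat := ((PySem.List.pyRange 1 (total + 1) 1).foldl
    (fun (st : Int × List String) k =>
      (st.1 * k, st.2 ++ [PySem.Int.toStr (st.1 * k)]))
    (1, [])).2
  ((PySem.List.pyRange 1 (n + 1) 1).foldl
    (fun (st : Int × List String) i =>
      (st.1 + i, st.2 ++ [PySem.Str.join " " (PySem.List.slice flat (some st.1) (some (st.1 + i)))]))
    (0, [])).2

-- ===== PRECONDITION & SPEC =====
def Spec_factorial_pattern (n : Int) (out : List String) : Prop := out = factorial_pattern_alt n
instance (n : Int) (out : List String) : Decidable (Spec_factorial_pattern n out) := by unfold Spec_factorial_pattern; infer_instance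

-- ===== CLAIM (what is proved, stated in full; the proofs are below) =====
def Claim_equal_factorial_pattern : Prop := ∀ (n : Int), Dom_factorial_pattern n → Spec_factorial_pattern n (factorial_pattern n)

-- ===== LEMMAS AND PROOFS =====

-- proof-side helpers
def pvFac : Nat → Int
  | 0 => 1
  | k + 1 => pvFac k * ((k : Int) + 1)

def pvTri : Nat → Nat
  | 0 => 0
  | m + 1 => pvTri m + (m + 1)

def pvRows (m : Nat) : List String :=
  (List.range m).map (fun i =>
    PySem.Str.join " " ((List.range (i + 1)).map (fun j => PySem.Int.toStr (pvFac (pvTri i + j + 1)))))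

lemma pvTri_closed (m : Nat) : pvTri m = m * (m + 1) / 2 := by
  induction m with
  | zero => rfl
  | succ k ih =>
    simp only [pvTri, ih]
    have h : (k + 1) * (k + 1 + 1) = k * (k + 1) + 2 * (k + 1) := by ring
    omega

lemma pvTri_mono {a b : Nat} (h : a ≤ b) : pvTri a ≤ pvTri b := by
  induction b, h using Nat.le_induction with
  | base => exact le_refl _
  | succ b hb ih => exact le_trans ih (by simp [pvTri])

-- A's inner loop: the element is ignored, so only the length matters.
lemma innerA (l : List Int) : ∀ (m : Nat) (row : List String),
    l.foldl
      (fun (u : Int × Int × List String) _ =>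
        (u.1 * u.2.1, u.2.1 + 1, u.2.2 ++ [PySem.Int.toStr (u.1 * u.2.1)]))
      (pvFac m, (m : Int) + 1, row)
    = (pvFac (m + l.length), ((m + l.length : Nat) : Int) + 1,
        row ++ (List.range l.length).map (fun j => PySem.Int.toStr (pvFac (m + j + 1)))) := by
  induction l with
  | nil => intro m row; simp
  | cons x xs ih =>
    intro m row
    simp only [List.foldl_cons]
    have h1 : pvFac m * ((m : Int) + 1) = pvFac (m + 1) := by
      simp [pvFac]
    rw [h1]
    have h2 : ((m : Int) + 1) + 1 = ((m + 1 : Nat) : Int) + 1 := by push_cast; ring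
    rw [h2, ih (m + 1)]
    refine Prod.ext ?_ (Prod.ext ?_ ?_)
    · show pvFac (m + 1 + xs.length) = pvFac (m + (x :: xs).length)
      congr 1
      simp only [List.length_cons]
      omega
    · show ((m + 1 + xs.length : Nat) : Int) + 1 = (((m + (x :: xs).length : Nat)) : Int) + 1
      simp only [List.length_cons]
      push_cast
      ring
    · show row ++ [PySem.Int.toStr (pvFac (m + 1))]
          ++ (List.range xs.length).map (fun j => PySem.Int.toStr (pvFac (m + 1 + j + 1)))
        = row ++ (List.range (x :: xs).length).map (fun j => PySem.Int.toStr (pvFac (m + j + 1)))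
      simp only [List.length_cons, List.range_succ_eq_map, List.map_cons, List.map_map,
        List.append_assoc, List.cons_append, List.nil_append]
      congr 1
      congr 1
      apply List.map_congr_left
      intro j _
      simp only [Function.comp_apply, Nat.succ_eq_add_one]
      congr 2
      omega

-- A's outer loop invariant.
lemma outerA (N : Nat) :
    ((PySem.List.pyRange 1 ((N : Int) + 1) 1).foldl
      (fun (st : Int × Int × List String) i =>
        let t := (PySem.List.pyRange 0 i 1).foldl
          (fun (u : Int × Int × List String) _ =>
            (u.1 * u.2.1, u.2.1 + 1, u.2.2 ++ [PySem.Int.toStr (u.1 * u.2.1)]))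
          (st.1, st.2.1, ([] : List String))
        (t.1, t.2.1, st.2.2 ++ [PySem.Str.join " " t.2.2]))
      (1, 1, []))
    = (pvFac (pvTri N), ((pvTri N : Nat) : Int) + 1, pvRows N) := by
  induction N with
  | zero =>
    rw [PySem.List.pyRange_one_eq_nil (by omega)]
    simp [pvFac, pvTri, pvRows]
  | succ k ih =>
    have hsplit : PySem.List.pyRange 1 (((k + 1 : Nat) : Int) + 1) 1
        = PySem.List.pyRange 1 ((k : Int) + 1) 1 ++ [(k : Int) + 1] := by
      have := PySem.List.pyRange_one_succ_right (a := 1) (b := (k : Int) + 1) (by omega)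
      push_cast
      push_cast at this
      exact this
    rw [hsplit, List.foldl_append, ih]
    have hlen : (PySem.List.pyRange 0 ((k : Int) + 1) 1).length = k + 1 := by
      rw [PySem.List.length_pyRange_one]; omega
    have hinner := innerA (PySem.List.pyRange 0 ((k : Int) + 1) 1) (pvTri k) []
    rw [hlen] at hinner
    simp only [List.foldl_cons, List.foldl_nil, hinner]
    refine Prod.ext ?_ (Prod.ext ?_ ?_)
    · simp only [pvTri]
    · simp only [pvTri]
    · simp only [pvRows, List.range_succ, List.map_append, List.map_cons, List.map_nil,
        List.nil_append]

-- B's flat pass produces the factorial strings 1!..T!.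
lemma flatB (T : Nat) :
    ((PySem.List.pyRange 1 ((T : Int) + 1) 1).foldl
      (fun (st : Int × List String) k =>
        (st.1 * k, st.2 ++ [PySem.Int.toStr (st.1 * k)]))
      (1, []))
    = (pvFac T, (List.range T).map (fun j => PySem.Int.toStr (pvFac (j + 1)))) := by
  induction T with
  | zero =>
    rw [PySem.List.pyRange_one_eq_nil (by omega)]
    simp [pvFac]
  | succ k ih =>
    have hsplit : PySem.List.pyRange 1 (((k + 1 : Nat) : Int) + 1) 1
        = PySem.List.pyRange 1 ((k : Int) + 1) 1 ++ [(k : Int) + 1] := by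
      have := PySem.List.pyRange_one_succ_right (a := 1) (b := (k : Int) + 1) (by omega)
      push_cast
      push_cast at this
      exact this
    rw [hsplit, List.foldl_append, ih]
    have h1 : pvFac k * ((k : Int) + 1) = pvFac (k + 1) := by simp [pvFac]
    simp only [List.foldl_cons, List.foldl_nil, h1, List.range_succ, List.map_append,
      List.map_cons, List.map_nil]

-- a drop/take window of a mapped range
lemma window_map_range {β : Type} (f : Nat → β) (T a b : Nat) (h : a + b ≤ T) :
    (((List.range T).map f).drop a).take b = (List.range b).map (fun j => f (a + j)) := by
  have hT : T = a + (T - a) := by omega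
  have hlen : ((List.range a).map f).length = a := by simp
  rw [hT, List.range_add, List.map_append, List.drop_left' hlen, List.map_map,
    ← List.map_take, List.take_range, Nat.min_eq_left (by omega)]
  simp [Function.comp]

-- B's slicing pass invariant (flat is the full list for N rows; M ≤ N rows consumed).
lemma sliceB (N : Nat) (M : Nat) (hMN : M ≤ N) :
    ((PySem.List.pyRange 1 ((M : Int) + 1) 1).foldl
      (fun (st : Int × List String) i =>
        (st.1 + i, st.2 ++ [PySem.Str.join " "
          (PySem.List.slice ((List.range (pvTri N)).map (fun j => PySem.Int.toStr (pvFac (j + 1))))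
            (some st.1) (some (st.1 + i)))]))
      (0, []))
    = (((pvTri M : Nat) : Int), pvRows M) := by
  induction M with
  | zero =>
    rw [PySem.List.pyRange_one_eq_nil (by omega)]
    simp [pvTri, pvRows]
  | succ k ih =>
    have hsplit : PySem.List.pyRange 1 (((k + 1 : Nat) : Int) + 1) 1
        = PySem.List.pyRange 1 ((k : Int) + 1) 1 ++ [(k : Int) + 1] := by
      have := PySem.List.pyRange_one_succ_right (a := 1) (b := (k : Int) + 1) (by omega)
      push_cast
      push_cast at this
      exact this
    rw [hsplit, List.foldl_append, ih (by omega)]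
    simp only [List.foldl_cons, List.foldl_nil]
    have hslice : PySem.List.slice ((List.range (pvTri N)).map (fun j => PySem.Int.toStr (pvFac (j + 1))))
        (some ((pvTri k : Nat) : Int)) (some (((pvTri k : Nat) : Int) + ((k : Int) + 1)))
        = (List.range (k + 1)).map (fun j => PySem.Int.toStr (pvFac (pvTri k + j + 1))) := by
      have hcast : ((pvTri k : Nat) : Int) + ((k : Int) + 1) = ((pvTri k + (k + 1) : Nat) : Int) := by
        push_cast; ring
      rw [hcast, PySem.List.slice_toNat _ (by positivity) (by positivity)]
      simp only [Int.toNat_natCast]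
      have hle : pvTri k + (k + 1) ≤ pvTri N := by
        have : pvTri (k + 1) ≤ pvTri N := pvTri_mono hMN
        simpa [pvTri] using this
      rw [show pvTri k + (k + 1) - pvTri k = k + 1 by omega,
        window_map_range _ _ _ _ hle]
    rw [hslice]
    refine Prod.ext ?_ ?_
    · simp only [pvTri]; push_cast; ring
    · simp only [pvRows, List.range_succ, List.map_append, List.map_cons, List.map_nil]

-- ===== VERDICT (by name: the statement is the Claim_ definition above) =====
theorem factorial_pattern_spec : Claim_equal_factorial_pattern := by
  intro n _
  unfold Spec_factorial_pattern factorial_pattern factorial_pattern_alt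
  by_cases hpos : 0 < n
  · have hn : n = ((n.toNat : Nat) : Int) := by omega
    set N := n.toNat with hN
    rw [hn]
    have h0 : (0 : Int) < ((N : Nat) : Int) := by omega
    have htot' : (if ((N : Nat) : Int) > 0
          then PySem.Int.floordiv (((N : Nat) : Int) * (((N : Nat) : Int) + 1)) 2 else 0)
        = ((pvTri N : Nat) : Int) := by
      rw [if_pos h0]
      have hc : ((N : Nat) : Int) * (((N : Nat) : Int) + 1) = ((N * (N + 1) : Nat) : Int) := by
        push_cast; ring
      rw [hc, show (2 : Int) = ((2 : Nat) : Int) by norm_num, PySem.Int.floordiv_natCast,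
        pvTri_closed]
    simp only [htot', flatB, outerA N, sliceB N N (le_refl N)]
  · have h1 : PySem.List.pyRange 1 (n + 1) 1 = [] := PySem.List.pyRange_one_eq_nil (by omega)
    rw [h1]
    simp
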